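-- pv_equiv track=rewrite | github.com/wan-catherine/Leetcode | problems/N1655_Distribute_Repeating_Integers.py | canDistribute_dp
-- ===== SOURCE A (Python) =====
-- import collections
--
-- def canDistribute_dp(nums, quantity):
--     """
--     :type nums: List[int]
--     :type quantity: List[int]
--     :rtype: bool
--     """
--     counter = collections.Counter(nums)
--     count = [0]
--     for i, v in counter.items():
--         count.append(v)
--
--     m, n = len(quantity), len(count)
--     dp = [[False] * (1 << m) for _ in range(n)]
--
--     def can_satifily_subset(count, subset):
--         res = 0
--         for i in range(len(quantity)):
--             if (subset >> i) & 1: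
--                 res += quantity[i]
--         return count >= res
--
--     for i in range(n):
--         dp[i][0] = True
--
--     for i in range(1, n):
--         for j in range(1, 1<<m):
--             if dp[i-1][j]:
--                 dp[i][j] = True
--                 continue
--             subset = j
--             while subset:
--                 if dp[i-1][j - subset] and can_satifily_subset(count[i], subset):
--                     dp[i][j] = True
--                     break
--                 subset = (subset - 1) & j
--     return dp[-1][-1]
-- ===== SOURCE B (Python) =====
-- import collections
--
-- def canDistribute_dp(nums, quantity):
--     # Backtracking: serve the orders smallest-first, assigning each to some remaining
--     # capacity; capacities are kept as a multiset (value -> multiplicity), so equal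
--     # capacities are tried only once per step.
--     qs = sorted(quantity)
--     caps = collections.Counter(collections.Counter(nums).values())
--
--     def dfs(j):
--         if j == len(qs):
--             return True
--         q = qs[j]
--         for v in list(caps):
--             if caps[v] > 0 and v >= q:
--                 caps[v] -= 1
--                 caps[v - q] += 1
--                 if dfs(j + 1):
--                     return True
--                 caps[v - q] -= 1
--                 caps[v] += 1
--         return False
--
--     return dfs(0)
-- ===== Notes on version B (the rewrite author's own statement) =====
-- stated objective: alternative
-- what changed: B replaces A's bottom-up bitmask DP over a 2D n x 2^m table (submask enumeration per cell) by depth-first backtracking: orders are served smallest-first and each is assigned to one remaining capacity, capacities kept as a value->multiplicity counter so equal capacities branch only once.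
import Mathlib
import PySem

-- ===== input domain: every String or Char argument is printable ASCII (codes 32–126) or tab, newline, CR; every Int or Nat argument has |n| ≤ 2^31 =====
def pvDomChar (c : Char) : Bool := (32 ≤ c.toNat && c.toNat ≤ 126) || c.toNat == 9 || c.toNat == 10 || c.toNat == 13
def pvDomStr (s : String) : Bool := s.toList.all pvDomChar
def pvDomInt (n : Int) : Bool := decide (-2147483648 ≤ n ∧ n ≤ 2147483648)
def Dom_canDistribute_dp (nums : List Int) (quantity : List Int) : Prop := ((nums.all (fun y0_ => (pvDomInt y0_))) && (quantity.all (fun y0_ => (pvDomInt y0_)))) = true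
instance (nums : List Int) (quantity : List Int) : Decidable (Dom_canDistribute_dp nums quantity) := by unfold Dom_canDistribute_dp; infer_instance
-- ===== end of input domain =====

-- B replaces A's bottom-up bitmask DP by depth-first backtracking: orders are served
-- smallest-first, each assigned to one remaining capacity, capacities kept as a
-- value -> multiplicity counter (objective: alternative algorithm, similar cost).

-- ===== PORT A =====
-- can_satifily_subset(count, subset): res sums quantity[i] over the set bits of subset
-- (i ∈ range(len(quantity)) is in range, so quantity[i] is List.getD — exact here)
def pvCanSat (quantity : List Int) (c : Int) (subset : Nat) : Bool :=
  let res : Int := (List.range quantity.length).foldl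
    (fun res i => if (subset >>> i) &&& 1 = 1 then res + quantity.getD i 0 else res) 0
  decide (res ≤ c)

-- the 'subset = j; while subset: …; subset = (subset-1) & j' loop of A
def pvWhileA (quantity : List Int) (prev : List Bool) (c : Int) (j : Nat) (subset : Nat) : Bool :=
  if h : subset = 0 then false
  else if prev.getD (j - subset) false && pvCanSat quantity c subset then true
  else pvWhileA quantity prev c j ((subset - 1) &&& j)
termination_by subset
decreasing_by exact Nat.lt_of_le_of_lt Nat.and_le_left (by omega)

def canDistribute_dp (nums : List Int) (quantity : List Int) : Bool :=
  let counter := PySem.Dict.counter nums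
  let count : List Int := counter.items.foldl (fun cnt iv => cnt ++ [iv.2]) [0]
  let m := quantity.length
  let n := count.length
  let dp : List (List Bool) := List.replicate n (List.replicate (2 ^ m) false)
  let dp := (List.range n).foldl (fun dp i => dp.set i ((dp.getD i []).set 0 true)) dp
  let dp := (List.range' 1 (n - 1)).foldl (fun dp i =>
      (List.range' 1 (2 ^ m - 1)).foldl (fun dp j =>
        if (dp.getD (i - 1) []).getD j false then dp.set i ((dp.getD i []).set j true)
        else if pvWhileA quantity (dp.getD (i - 1) []) (count.getD i 0) j j then
          dp.set i ((dp.getD i []).set j true)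
        else dp) dp) dp
  (dp.getD (n - 1) []).getD (2 ^ m - 1) false

-- ===== PORT B =====
-- dfs(j): for v in list(caps): if caps[v] > 0 and v >= q: try assigning order q to a
-- capacity v (caps[v] -= 1; caps[v-q] += 1) and recurse; the Python restores caps after
-- a failed branch, which the pure port gets by passing the updated dict only downwards.
def pvDfsB : List Int → PySem.Dict Int Int → Bool
  | [], _ => true
  | q :: rest, caps =>
      caps.keys.any (fun v =>
        decide (0 < caps.getD v 0) && decide (q ≤ v) &&
        pvDfsB rest ((caps.modify v 0 (· - 1)).modify (v - q) 0 (· + 1)))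

def canDistribute_dp_alt (nums : List Int) (quantity : List Int) : Bool :=
  pvDfsB (PySem.List.sorted quantity (fun x => x) false)
    (PySem.Dict.counter ((PySem.Dict.counter nums).values))

-- ===== PRECONDITION & SPEC =====
def Spec_canDistribute_dp (nums : List Int) (quantity : List Int) (out : Bool) : Prop := out = canDistribute_dp_alt nums quantity
instance (nums : List Int) (quantity : List Int) (out : Bool) : Decidable (Spec_canDistribute_dp nums quantity out) := by unfold Spec_canDistribute_dp; infer_instance

-- ===== CLAIM (what is proved, stated in full; the proofs are below) =====
def Claim_equal_canDistribute_dp : Prop := ∀ (nums : List Int) (quantity : List Int), Dom_canDistribute_dp nums quantity → Spec_canDistribute_dp nums quantity (canDistribute_dp nums quantity)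

-- ===== LEMMAS AND PROOFS =====

-- mathematical subset sum: pvBitSum qs mask = Σ qs[i] over the set bits of mask
def pvBitSum : List Int → Nat → Int
  | [], _ => 0
  | q :: qs, mask => (if mask % 2 = 1 then q else 0) + pvBitSum qs (mask / 2)

-- the sublist of qs selected by the set bits of a mask
def pvMaskSel : List Int → Nat → List Int
  | [], _ => []
  | q :: qs, j => (if j % 2 = 1 then [q] else []) ++ pvMaskSel qs (j / 2)

-- A's reachability, counts listed in reverse processing order
def pvReachR (qs : List Int) : List Int → Nat → Prop
  | [], j => j = 0
  | c :: cs, j => pvReachR qs cs j ∨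
      ∃ s, s ≠ 0 ∧ s &&& j = s ∧ pvBitSum qs s ≤ c ∧ pvReachR qs cs (j ^^^ s)

-- partition existence: each count c takes a sub-multiset of the orders, sum ≤ c
def pvSplit : List Int → List Int → Prop
  | [], l => l = []
  | c :: cs, l => ∃ l1 l2, l.Perm (l1 ++ l2) ∧ l1.sum ≤ c ∧ pvSplit cs l2

-- sequential assignment: serve the orders in list order from a multiset of capacities
def pvFits : List Int → List Int → Prop
  | [], _ => True
  | q :: l, C => ∃ v, v ∈ C ∧ q ≤ v ∧ pvFits l ((v - q) :: C.erase v)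

-- the row [False]*(2^m) with cell 0 set to True
def pvRowInit (m : Nat) : List Bool := (List.replicate (2 ^ m) false).set 0 true

-- A's inner j-loop, abstracted to a single row (prev = row i-1, result = row i)
def pvStepRow (quantity : List Int) (prev : List Bool) (c : Int) : List Bool :=
  (List.range' 1 (2 ^ quantity.length - 1)).foldl
    (fun row j => if prev.getD j false then row.set j true
      else if pvWhileA quantity prev c j j then row.set j true else row)
    (pvRowInit quantity.length)

-- the multiset of capacities a dict value -> multiplicity represents
def pvExpand (d : PySem.Dict Int Int) : List Int :=
  d.items.flatMap (fun p => List.replicate p.2.toNat p.1)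

def pvCapsInv (d : PySem.Dict Int Int) : Prop :=
  d.keys.Nodup ∧ ∀ x : Int, 0 ≤ d.getD x 0

theorem pvGetD_set {α : Type} (l : List α) (i j : Nat) (v d : α) :
    (l.set i v).getD j d = if i = j ∧ i < l.length then v else l.getD j d := by
  simp only [List.getD_eq_getElem?_getD, List.getElem?_set]
  split_ifs with h1 h2 h3 h4 <;> simp_all <;> try omega

theorem pvGetD_lt {α : Type} (l : List α) (i : Nat) (d : α) (h : i < l.length) :
    l.getD i d = l[i] := List.getD_eq_getElem l d h

theorem pvSubXor : ∀ (j s : Nat), s &&& j = s → j - s = j ^^^ s := by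
  intro j
  induction j using Nat.strong_induction_on with
  | _ j ih =>
    intro s h
    rcases Nat.eq_zero_or_pos j with hj | hj
    · subst hj
      have : s = 0 := by rw [← h, Nat.and_zero]
      subst this; rfl
    · have h2 : (s / 2) &&& (j / 2) = s / 2 := by
        rw [← Nat.and_div_two, h]
      have ihx := ih (j / 2) (by omega) (s / 2) h2
      have hle2 : s / 2 ≤ j / 2 := by
        conv_lhs => rw [← h2]
        exact Nat.and_le_right
      have hm : s % 2 = 1 → j % 2 = 1 := by
        intro hs
        have hb := congrArg (fun x => x.testBit 0) h
        simp only [Nat.testBit_and] at hb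
        have hsb : s.testBit 0 = true := by
          rw [Nat.testBit_zero]; simp [hs]
        rw [hsb, Bool.true_and] at hb
        have : j.testBit 0 = true := hb
        rw [Nat.testBit_zero] at this
        simpa using this
      have xd : (j ^^^ s) / 2 = j / 2 ^^^ s / 2 := Nat.xor_div_two
      have xm : (j ^^^ s) % 2 = (j + s) % 2 := Nat.xor_mod_two_eq
      omega

-- low bit of &&&
theorem pvAndMod (a b : Nat) : (a &&& b) % 2 = a % 2 * (b % 2) := by
  have hb : (a &&& b).testBit 0 = (a.testBit 0 && b.testBit 0) := Nat.testBit_and ..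
  have hb2 : ((a &&& b) % 2 = 1) ↔ (a % 2 = 1 ∧ b % 2 = 1) := by
    have h := congrArg (fun x : Bool => x = true) hb
    simp only [Nat.testBit_zero, Bool.and_eq_true, decide_eq_true_eq] at h
    exact iff_of_eq h
  have m3 := Nat.mod_two_eq_zero_or_one (a &&& b)
  rcases Nat.mod_two_eq_zero_or_one a with h1 | h1 <;>
    rcases Nat.mod_two_eq_zero_or_one b with h2 | h2 <;> rw [h1, h2] <;> omega

-- pvCanSat computes pvBitSum and compares
theorem pvResAux : ∀ (qs : List Int) (subset : Nat) (a : Int),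
    (List.range qs.length).foldl
      (fun r i => if (subset >>> i) &&& 1 = 1 then r + qs.getD i 0 else r) a
    = a + pvBitSum qs subset := by
  intro qs
  induction qs with
  | nil => intro subset a; simp [pvBitSum]
  | cons q qs ih =>
    intro subset a
    have hlen : (q :: qs).length = qs.length + 1 := rfl
    rw [hlen, List.range_succ_eq_map, List.foldl_cons, List.foldl_map]
    have hbody : ∀ (r : Int) (i : Nat),
        (if (subset >>> (i + 1)) &&& 1 = 1 then r + (q :: qs).getD (i + 1) 0 else r)
        = (if ((subset / 2) >>> i) &&& 1 = 1 then r + qs.getD i 0 else r) := by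
      intro r i
      have hsh : subset >>> (i + 1) = (subset / 2) >>> i := by
        rw [Nat.shiftRight_eq_div_pow, Nat.shiftRight_eq_div_pow, pow_succ']
        rw [← Nat.div_div_eq_div_mul]
      rw [hsh]; rfl
    have : ((List.range qs.length).foldl
        (fun r i => if (subset >>> (i + 1)) &&& 1 = 1 then r + (q :: qs).getD (i + 1) 0 else r)
        (if (subset >>> 0) &&& 1 = 1 then a + (q :: qs).getD 0 0 else a))
        = ((List.range qs.length).foldl
        (fun r i => if ((subset / 2) >>> i) &&& 1 = 1 then r + qs.getD i 0 else r)
        (if (subset >>> 0) &&& 1 = 1 then a + (q :: qs).getD 0 0 else a)) := by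
      apply PySem.List.foldl_congr_mem
      intro r i _; exact hbody r i
    rw [this, ih]
    have h0 : (subset >>> 0) &&& 1 = subset % 2 := by
      rw [Nat.shiftRight_zero, Nat.and_one_is_mod]
    rw [h0]
    show (if subset % 2 = 1 then a + q else a) + pvBitSum qs (subset / 2)
      = a + pvBitSum (q :: qs) subset
    rw [pvBitSum]
    split_ifs <;> ring

theorem pvCanSat_eq (quantity : List Int) (c : Int) (subset : Nat) :
    pvCanSat quantity c subset = decide (pvBitSum quantity subset ≤ c) := by
  unfold pvCanSat
  rw [pvResAux, zero_add]

-- (subset-1) &&& j is an upper bound for every submask of j strictly below subset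
theorem pvNextSub : ∀ (j s subset : Nat), s &&& j = s → subset &&& j = subset →
    s < subset → s ≤ (subset - 1) &&& j := by
  intro j
  induction j using Nat.strong_induction_on with
  | _ j ih =>
    intro s subset hs hsub hlt
    have hj0 : j ≠ 0 := by
      rintro rfl
      rw [Nat.and_zero] at hsub
      omega
    have hsd : s / 2 &&& j / 2 = s / 2 := by rw [← Nat.and_div_two, hs]
    have hsubd : subset / 2 &&& j / 2 = subset / 2 := by rw [← Nat.and_div_two, hsub]
    have hsm : s % 2 = s % 2 * (j % 2) := by
      conv_lhs => rw [← hs]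
      exact pvAndMod s j
    have htd : ((subset - 1) &&& j) / 2 = (subset - 1) / 2 &&& j / 2 := Nat.and_div_two
    have htm : ((subset - 1) &&& j) % 2 = (subset - 1) % 2 * (j % 2) := pvAndMod _ _
    have ht2 := Nat.mod_two_eq_zero_or_one ((subset - 1) &&& j)
    have hj2 := Nat.mod_two_eq_zero_or_one (j)
    have hs2 := Nat.mod_two_eq_zero_or_one s
    have hsmle : s % 2 ≤ j % 2 := by
      rcases hj2 with h | h
      · rw [h, mul_zero] at hsm; omega
      · omega
    rcases Nat.mod_two_eq_zero_or_one subset with he | ho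
    · -- subset even, so subset = 2k with k ≥ 1
      have hk1 : 1 ≤ subset / 2 := by omega
      have hd1 : (subset - 1) / 2 = subset / 2 - 1 := by omega
      have hd2 : (subset - 1) % 2 = 1 := by omega
      have hslt : s / 2 < subset / 2 := by omega
      have := ih (j / 2) (by omega) (s / 2) (subset / 2) hsd hsubd hslt
      rw [hd1] at htd
      rw [hd2, one_mul] at htm
      omega
    · -- subset odd: (subset-1) &&& j = subset - 1
      have hd1 : (subset - 1) / 2 = subset / 2 := by omega
      have hd2 : (subset - 1) % 2 = 0 := by omega
      rw [hd1, hsubd] at htd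
      rw [hd2, zero_mul] at htm
      omega

-- the while loop finds exactly the nonzero submasks below its start
theorem pvWhileA_iff (quantity : List Int) (prev : List Bool) (c : Int) (j : Nat) :
    ∀ subset, subset &&& j = subset →
    (pvWhileA quantity prev c j subset = true ↔
      ∃ s, s ≠ 0 ∧ s &&& j = s ∧ s ≤ subset ∧ prev.getD (j - s) false = true ∧
        pvBitSum quantity s ≤ c) := by
  intro subset
  induction subset using Nat.strong_induction_on with
  | _ subset ih =>
    intro hsub
    rw [pvWhileA]
    by_cases h0 : subset = 0
    · subst h0
      simp only [dif_pos rfl]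
      constructor
      · intro h; exact absurd h (by simp)
      · rintro ⟨s, h1, _, h3, _⟩; omega
    · rw [dif_neg h0]
      by_cases hc : (prev.getD (j - subset) false && pvCanSat quantity c subset) = true
      · rw [if_pos hc]
        rcases Bool.and_eq_true_iff.mp hc with ⟨hc1, hc2⟩
        rw [pvCanSat_eq] at hc2
        simp only [true_iff]
        exact ⟨subset, h0, hsub, le_refl _, hc1, of_decide_eq_true hc2⟩
      · rw [if_neg hc]
        have hnextsub : ((subset - 1) &&& j) &&& j = (subset - 1) &&& j := by
          rw [Nat.and_assoc, Nat.and_self]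
        have hnextlt : (subset - 1) &&& j < subset :=
          Nat.lt_of_le_of_lt Nat.and_le_left (by omega)
        rw [ih _ hnextlt hnextsub]
        constructor
        · rintro ⟨s, h1, h2, h3, h4, h5⟩
          refine ⟨s, h1, h2, le_trans h3 (le_trans Nat.and_le_left (by omega)), h4, h5⟩
        · rintro ⟨s, h1, h2, h3, h4, h5⟩
          have hne : s ≠ subset := by
            rintro rfl
            exact hc (by rw [h4, pvCanSat_eq, decide_eq_true h5]; rfl)
          exact ⟨s, h1, h2, pvNextSub j s subset h2 hsub (by omega), h4, h5⟩

theorem pvRowInit_getD_pos (m : Nat) (j : Nat) (hj : 1 ≤ j) :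
    (pvRowInit m).getD j false = false := by
  rw [pvRowInit, pvGetD_set]
  rw [if_neg (by omega)]
  rcases Nat.lt_or_ge j (2 ^ m) with h | h
  · rw [pvGetD_lt _ _ _ (by simpa using h)]; simp
  · rw [List.getD_eq_getElem?_getD, List.getElem?_eq_none (by simpa using h)]; rfl

-- A's table: the inner j-loop only writes row i, reading row i-1
theorem pvTblInner (quantity count : List Int) (i : Nat) (hi : 1 ≤ i) :
    ∀ (js : List Nat) (t : List (List Bool)), i < t.length →
    js.foldl (fun dp j =>
        if (dp.getD (i - 1) []).getD j false then dp.set i ((dp.getD i []).set j true)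
        else if pvWhileA quantity (dp.getD (i - 1) []) (count.getD i 0) j j then
          dp.set i ((dp.getD i []).set j true)
        else dp) t
    = t.set i (js.foldl (fun row j =>
        if (t.getD (i - 1) []).getD j false then row.set j true
        else if pvWhileA quantity (t.getD (i - 1) []) (count.getD i 0) j j then row.set j true
        else row) (t.getD i [])) := by
  intro js
  induction js with
  | nil =>
    intro t hit
    simp only [List.foldl_nil]
    rw [pvGetD_lt _ _ _ hit]
    exact (List.set_getElem_self hit).symm
  | cons j js ih =>
    intro t hit
    rw [List.foldl_cons, List.foldl_cons]
    have hne : i - 1 ≠ i := by omega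
    by_cases h1 : (t.getD (i - 1) []).getD j false = true
    · rw [if_pos h1, if_pos h1]
      set t' := t.set i ((t.getD i []).set j true) with ht'
      rw [ih t' (by simpa [ht'] using hit)]
      have e1 : t'.getD (i - 1) [] = t.getD (i - 1) [] := by
        rw [ht', pvGetD_set, if_neg (by tauto)]
      have e2 : t'.getD i [] = (t.getD i []).set j true := by
        rw [ht', pvGetD_set, if_pos ⟨rfl, hit⟩]
      rw [e1, e2, ht', List.set_set]
    · rw [if_neg h1, if_neg h1]
      by_cases h2 : pvWhileA quantity (t.getD (i - 1) []) (count.getD i 0) j j = true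
      · rw [if_pos h2, if_pos h2]
        set t' := t.set i ((t.getD i []).set j true) with ht'
        rw [ih t' (by simpa [ht'] using hit)]
        have e1 : t'.getD (i - 1) [] = t.getD (i - 1) [] := by
          rw [ht', pvGetD_set, if_neg (by tauto)]
        have e2 : t'.getD i [] = (t.getD i []).set j true := by
          rw [ht', pvGetD_set, if_pos ⟨rfl, hit⟩]
        rw [e1, e2, ht', List.set_set]
      · rw [if_neg h2, if_neg h2]
        exact ih t hit

-- A's outer i-loop builds the chain of model rows
theorem pvTblOuter (quantity count : List Int) :
    ∀ (ws : List Int) (s : Nat) (t : List (List Bool)), 1 ≤ s →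
    t.length = s + ws.length →
    (∀ i, s ≤ i → i < t.length → t.getD i [] = pvRowInit quantity.length) →
    (∀ k, k < ws.length → count.getD (s + k) 0 = ws.getD k 0) →
    ((List.range' s ws.length).foldl (fun dp i =>
        (List.range' 1 (2 ^ quantity.length - 1)).foldl (fun dp j =>
          if (dp.getD (i - 1) []).getD j false then dp.set i ((dp.getD i []).set j true)
          else if pvWhileA quantity (dp.getD (i - 1) []) (count.getD i 0) j j then
            dp.set i ((dp.getD i []).set j true)
          else dp) dp) t).getD (s + ws.length - 1) []
    = ws.foldl (fun p c => pvStepRow quantity p c) (t.getD (s - 1) []) := by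
  intro ws
  induction ws with
  | nil =>
    intro s t hs hlen hrows hcnt
    simp only [List.length_nil, List.range'_zero, List.foldl_nil, List.foldl_nil,
      Nat.add_zero]
  | cons w ws ih =>
    intro s t hs hlen hrows hcnt
    simp only [List.length_cons] at hlen ⊢
    rw [List.range'_succ, List.foldl_cons]
    have hst : s < t.length := by omega
    rw [pvTblInner quantity count s hs _ t hst]
    have hts : t.getD s [] = pvRowInit quantity.length := hrows s (le_refl s) hst
    have hcw : count.getD s 0 = w := by
      have := hcnt 0 (by simp)
      simpa using this
    set t' := t.set s ((List.range' 1 (2 ^ quantity.length - 1)).foldl (fun row j =>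
        if (t.getD (s - 1) []).getD j false then row.set j true
        else if pvWhileA quantity (t.getD (s - 1) []) (count.getD s 0) j j then row.set j true
        else row) (t.getD s [])) with ht'
    have hstep : t'.getD s [] = pvStepRow quantity (t.getD (s - 1) []) w := by
      rw [ht', pvGetD_set, if_pos ⟨rfl, hst⟩, hts, hcw, pvStepRow]
    have := ih (s + 1) t' (by omega)
      (by simp only [ht', List.length_set]; omega)
      (by
        intro i hi1 hi2
        rw [ht', pvGetD_set, if_neg (by omega)]
        exact hrows i (by omega) (by simpa only [ht', List.length_set] using hi2))
      (by
        intro k hk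
        have := hcnt (k + 1) (by simp; omega)
        rw [show s + 1 + k = s + (k + 1) by omega]
        simpa using this)
    rw [show s + 1 - 1 = s by omega] at this
    rw [hstep] at this
    rw [show s + (ws.length + 1) - 1 = s + 1 + ws.length - 1 by omega]
    rw [this, List.foldl_cons]

-- the init loop ([0]-column pass) sets cell 0 of every row
theorem pvInitFold : ∀ (k : Nat) (t : List (List Bool)),
    (((List.range k).foldl (fun dp i => dp.set i ((dp.getD i []).set 0 true)) t).length
      = t.length) ∧
    (∀ i, ((List.range k).foldl (fun dp i => dp.set i ((dp.getD i []).set 0 true)) t).getD i []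
      = if i < k then (t.getD i []).set 0 true else t.getD i []) := by
  intro k
  induction k with
  | zero => intro t; simp
  | succ k ih =>
    intro t
    rw [List.range_succ]
    simp only [List.foldl_append, List.foldl_cons, List.foldl_nil]
    obtain ⟨ihl, ihg⟩ := ih t
    constructor
    · rw [List.length_set]; exact ihl
    · intro i
      rw [pvGetD_set]
      by_cases hik : i = k
      · subst hik
        by_cases hkt : i < t.length
        · rw [if_pos ⟨rfl, by omega⟩, ihg, if_neg (by omega), if_pos (by omega)]
        · rw [if_neg (by omega), ihg, if_neg (by omega)]
          have : t.getD i [] = [] := by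
            rw [List.getD_eq_getElem?_getD, List.getElem?_eq_none (by omega)]; rfl
          rw [if_pos (by omega), this]; rfl
      · rw [if_neg (by tauto), ihg]
        by_cases h1 : i < k
        · rw [if_pos h1, if_pos (by omega)]
        · rw [if_neg h1, if_neg (by omega)]

-- A's whole computation equals the fold of model rows, read at the full mask
theorem pvA_eq_chain (nums quantity : List Int) :
    canDistribute_dp nums quantity
      = ((PySem.Dict.counter nums).values.foldl (fun p c => pvStepRow quantity p c)
          (pvRowInit quantity.length)).getD (2 ^ quantity.length - 1) false := by
  unfold canDistribute_dp
  simp only []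
  set m := quantity.length with hm
  set vs : List Int := (PySem.Dict.counter nums).values with hvs
  have hcount : (PySem.Dict.counter nums).items.foldl (fun cnt iv => cnt ++ [iv.2]) [0]
      = 0 :: vs := by
    rw [PySem.List.foldl_append_singleton_eq_map]
    rfl
  rw [hcount]
  set count : List Int := 0 :: vs with hcountdef
  have hn : count.length = vs.length + 1 := by simp [hcountdef]
  obtain ⟨hil, hig⟩ := pvInitFold count.length
    (List.replicate count.length (List.replicate (2 ^ m) false))
  set t0 := (List.range count.length).foldl (fun dp i => dp.set i ((dp.getD i []).set 0 true))
    (List.replicate count.length (List.replicate (2 ^ m) false)) with ht0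
  have ht0len : t0.length = count.length := by
    rw [ht0, hil, List.length_replicate]
  have ht0row : ∀ i, i < count.length → t0.getD i [] = pvRowInit m := by
    intro i hi
    rw [ht0, hig, if_pos hi, pvGetD_lt _ _ _ (by simpa using hi), List.getElem_replicate]
    rfl
  have houter := pvTblOuter quantity count vs 1 t0 (le_refl 1)
    (by omega)
    (by intro i h1 h2; exact ht0row i (by omega))
    (by intro k hk; rw [show 1 + k = k + 1 by omega]; simp [hcountdef])
  rw [show (1 : Nat) - 1 = 0 by rfl] at houter
  have ht00 : t0.getD 0 [] = pvRowInit m := ht0row 0 (by omega)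
  rw [ht00] at houter
  rw [show count.length - 1 = vs.length by omega]
  rw [show 1 + vs.length - 1 = vs.length by omega] at houter
  rw [houter]

-- ===== the step-row, read cell-wise =====

theorem pvFoldSet (P : Nat → Bool) :
    ∀ (js : List Nat) (init : List Bool) (x : Nat),
    ((js.foldl (fun row j => if P j then row.set j true else row) init).getD x false = true
      ↔ (init.getD x false = true ∨ (x ∈ js ∧ P x = true ∧ x < init.length))) := by
  intro js
  induction js with
  | nil => intro init x; simp
  | cons j js ih =>
    intro init x
    rw [List.foldl_cons]
    set init' := if P j then init.set j true else init with hinit'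
    have hlen' : init'.length = init.length := by
      rw [hinit']; split_ifs <;> simp
    rw [ih init' x, hlen']
    have hget : init'.getD x false = true ↔
        (init.getD x false = true ∨ (x = j ∧ P x = true ∧ x < init.length)) := by
      rw [hinit']
      by_cases hp : P j = true
      · rw [if_pos hp, pvGetD_set]
        by_cases hxj : j = x ∧ j < init.length
        · rw [if_pos hxj]
          constructor
          · intro _; exact Or.inr ⟨hxj.1.symm, hxj.1 ▸ hp, hxj.1 ▸ hxj.2⟩
          · intro _; rfl
        · rw [if_neg hxj]
          constructor
          · exact Or.inl
          · rintro (h | ⟨h1, h2, h3⟩)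
            · exact h
            · exact absurd ⟨h1.symm, h1 ▸ h3⟩ hxj
      · rw [if_neg hp]
        constructor
        · exact Or.inl
        · rintro (h | ⟨h1, h2, h3⟩)
          · exact h
          · exact absurd (h1 ▸ h2) hp
    rw [hget]
    simp only [List.mem_cons]
    constructor
    · rintro ((h | ⟨h1, h2, h3⟩) | ⟨h1, h2, h3⟩)
      · exact Or.inl h
      · exact Or.inr ⟨Or.inl h1, h2, h3⟩
      · exact Or.inr ⟨Or.inr h1, h2, h3⟩
    · rintro (h | ⟨(h1 | h1), h2, h3⟩)
      · exact Or.inl (Or.inl h)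
      · exact Or.inl (Or.inr ⟨h1, h2, h3⟩)
      · exact Or.inr ⟨h1, h2, h3⟩

theorem pvRowInit_getD_zero (m : Nat) : (pvRowInit m).getD 0 false = true := by
  rw [pvRowInit, pvGetD_set, if_pos ⟨rfl, by simpa using Nat.two_pow_pos m⟩]

theorem pvStepRow_getD (quantity : List Int) (prev : List Bool) (c : Int) (j : Nat)
    (hj : j < 2 ^ quantity.length) :
    (pvStepRow quantity prev c).getD j false
      = if j = 0 then true else prev.getD j false || pvWhileA quantity prev c j j := by
  have hlen : (pvRowInit quantity.length).length = 2 ^ quantity.length := by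
    simp [pvRowInit]
  have hcongr : pvStepRow quantity prev c
      = (List.range' 1 (2 ^ quantity.length - 1)).foldl
          (fun row j => if (prev.getD j false || pvWhileA quantity prev c j j)
            then row.set j true else row) (pvRowInit quantity.length) := by
    unfold pvStepRow
    apply PySem.List.foldl_congr_mem
    intro b a _
    by_cases h1 : prev.getD a false = true <;>
      by_cases h2 : pvWhileA quantity prev c a a = true <;> simp [h1, h2]
  rw [hcongr]
  by_cases hj0 : j = 0
  · subst hj0
    rw [if_pos rfl]
    exact (pvFoldSet _ _ _ _).mpr (Or.inl (pvRowInit_getD_zero _))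
  · rw [if_neg hj0, Bool.eq_iff_iff, pvFoldSet]
    rw [pvRowInit_getD_pos _ _ (by omega), hlen]
    have hmem : j ∈ List.range' 1 (2 ^ quantity.length - 1) := by
      rw [List.mem_range'_1]
      omega
    constructor
    · rintro (h | ⟨_, h2, _⟩)
      · exact absurd h (by simp)
      · exact h2
    · intro h
      exact Or.inr ⟨hmem, h, hj⟩

-- ===== chain ↔ pvReachR =====

theorem pvReachR_zero (qs : List Int) : ∀ cs, pvReachR qs cs 0 := by
  intro cs
  induction cs with
  | nil => exact rfl
  | cons c cs ih => exact Or.inl ih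

theorem pvChain_iff (qs : List Int) :
    ∀ (cs : List Int) (j : Nat), j < 2 ^ qs.length →
    ((cs.foldl (fun p c => pvStepRow qs p c) (pvRowInit qs.length)).getD j false = true
      ↔ pvReachR qs cs.reverse j) := by
  intro cs
  induction cs using List.reverseRecOn with
  | nil =>
    intro j hj
    simp only [List.foldl_nil, List.reverse_nil]
    show _ ↔ j = 0
    by_cases hj0 : j = 0
    · subst hj0
      rw [pvRowInit_getD_zero]
      simp
    · rw [pvRowInit_getD_pos _ _ (by omega)]
      simp [hj0]
  | append_singleton cs c ih =>
    intro j hj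
    rw [List.foldl_append, List.foldl_cons, List.foldl_nil, List.reverse_append]
    simp only [List.reverse_cons, List.reverse_nil, List.nil_append, List.singleton_append]
    rw [pvStepRow_getD _ _ _ j hj]
    show _ ↔ pvReachR qs (c :: cs.reverse) j
    by_cases hj0 : j = 0
    · subst hj0
      rw [if_pos rfl]
      constructor
      · intro _; exact Or.inl (pvReachR_zero qs cs.reverse)
      · intro _; rfl
    · rw [if_neg hj0, Bool.or_eq_true]
      constructor
      · rintro (h | h)
        · exact Or.inl ((ih j hj).mp h)
        · obtain ⟨t, h1, h2, _, h4, h5⟩ :=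
            (pvWhileA_iff qs _ c j j (Nat.and_self j)).mp h
          refine Or.inr ⟨t, h1, h2, h5, ?_⟩
          have hx : j - t = j ^^^ t := pvSubXor j t h2
          have hb : j ^^^ t < 2 ^ qs.length := by omega
          exact (ih (j ^^^ t) hb).mp (by rw [← hx]; exact h4)
      · rintro (h | ⟨t, h1, h2, h3, h4⟩)
        · exact Or.inl ((ih j hj).mpr h)
        · right
          apply (pvWhileA_iff qs _ c j j (Nat.and_self j)).mpr
          have hx : j - t = j ^^^ t := pvSubXor j t h2
          have hle : t ≤ j := by
            conv_lhs => rw [← h2]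
            exact Nat.and_le_right
          have hb : j ^^^ t < 2 ^ qs.length := by omega
          exact ⟨t, h1, h2, hle, by rw [hx]; exact (ih (j ^^^ t) hb).mpr h4, h3⟩

-- ===== pvReachR ↔ pvSplit (mask side) =====

theorem pvBitSum_eq_sum (qs : List Int) : ∀ s, pvBitSum qs s = (pvMaskSel qs s).sum := by
  induction qs with
  | nil => intro s; simp [pvBitSum, pvMaskSel]
  | cons q qs ih =>
    intro s
    simp only [pvBitSum, pvMaskSel, List.sum_append]
    rw [ih]
    split_ifs <;> simp

theorem pvMaskSel_full (qs : List Int) : pvMaskSel qs (2 ^ qs.length - 1) = qs := by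
  induction qs with
  | nil => rfl
  | cons q qs ih =>
    have hp := Nat.one_le_two_pow (n := qs.length)
    have h1 : (2 ^ (qs.length + 1) - 1) % 2 = 1 := by rw [pow_succ]; omega
    have h2 : (2 ^ (qs.length + 1) - 1) / 2 = 2 ^ qs.length - 1 := by rw [pow_succ]; omega
    simp only [List.length_cons, pvMaskSel, h1, h2, ih]
    rfl

theorem pvBitRec (a b : Nat) : a &&& b = 2 * (a / 2 &&& b / 2) + (a % 2) * (b % 2) := by
  have h1 := pvAndMod a b
  have h2 : (a &&& b) / 2 = a / 2 &&& b / 2 := Nat.and_div_two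
  omega

theorem pvXorRec (a b : Nat) : a ^^^ b = 2 * (a / 2 ^^^ b / 2) + (a + b) % 2 := by
  have h1 : (a ^^^ b) % 2 = (a + b) % 2 := Nat.xor_mod_two_eq
  have h2 : (a ^^^ b) / 2 = a / 2 ^^^ b / 2 := Nat.xor_div_two
  omega

theorem pvMaskSplit (qs : List Int) :
    ∀ (j s : Nat), s &&& j = s →
    (pvMaskSel qs j).Perm (pvMaskSel qs s ++ pvMaskSel qs (j ^^^ s)) := by
  induction qs with
  | nil => intro j s _; simp [pvMaskSel]
  | cons q qs ih =>
    intro j s hs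
    have hd : s / 2 &&& j / 2 = s / 2 := by rw [← Nat.and_div_two, hs]
    have hrec := pvBitRec s j
    have hxrec := pvXorRec j s
    have hxd : (j ^^^ s) / 2 = j / 2 ^^^ s / 2 := Nat.xor_div_two
    have ihd := ih (j / 2) (s / 2) hd
    have hsm : s % 2 = s % 2 * (j % 2) := by
      conv_lhs => rw [← hs]
      exact pvAndMod s j
    rcases Nat.mod_two_eq_zero_or_one j with hj2 | hj2
    · have hs2 : s % 2 = 0 := by rw [hj2, mul_zero] at hsm; omega
      have hx2 : (j ^^^ s) % 2 = 0 := by omega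
      simp only [pvMaskSel, hj2, hs2, hx2, hxd]
      simpa using ihd
    · rcases Nat.mod_two_eq_zero_or_one s with hs2 | hs2
      · have hx2 : (j ^^^ s) % 2 = 1 := by omega
        simp only [pvMaskSel, hj2, hs2, hx2, hxd]
        simp only [if_pos rfl, if_neg (by omega : ¬(0 = 1) )]
        refine List.Perm.trans (List.Perm.cons q ihd) ?_
        simpa using List.perm_middle.symm
      · have hx2 : (j ^^^ s) % 2 = 0 := by omega
        simp only [pvMaskSel, hj2, hs2, hx2, hxd]
        simpa using List.Perm.cons q ihd

theorem pvPermEraseL {l1 l2 M : List Int} {q : Int} (h : (q :: M).Perm (l1 ++ l2))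
    (hq : q ∈ l1) : M.Perm (l1.erase q ++ l2) := by
  have h1 : l1.Perm (q :: l1.erase q) := List.perm_cons_erase hq
  have h2 : (q :: M).Perm (q :: (l1.erase q ++ l2)) :=
    h.trans ((h1.append_right l2).trans (by simp))
  exact h2.cons_inv

theorem pvPermEraseR {l1 l2 M : List Int} {q : Int} (h : (q :: M).Perm (l1 ++ l2))
    (hq : q ∈ l2) : M.Perm (l1 ++ l2.erase q) := by
  have h1 : l2.Perm (q :: l2.erase q) := List.perm_cons_erase hq
  have h2 : (q :: M).Perm (q :: (l1 ++ l2.erase q)) :=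
    h.trans ((h1.append_left l1).trans List.perm_middle)
  exact h2.cons_inv

theorem pvMaskChoose (qs : List Int) :
    ∀ (j : Nat) (l1 l2 : List Int), (pvMaskSel qs j).Perm (l1 ++ l2) →
    ∃ s, s &&& j = s ∧ (pvMaskSel qs s).Perm l1 ∧ (pvMaskSel qs (j ^^^ s)).Perm l2 := by
  induction qs with
  | nil =>
    intro j l1 l2 h
    have h0 : l1 ++ l2 = [] := (List.Perm.symm h).eq_nil
    have h1 : l1 = [] := by
      cases l1 with
      | nil => rfl
      | cons a t => simp at h0
    have h2 : l2 = [] := by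
      rw [h1] at h0
      simpa using h0
    exact ⟨0, Nat.zero_and j, by simp [pvMaskSel, h1], by simp [pvMaskSel, h2]⟩
  | cons q qs ih =>
    intro j l1 l2 h
    rcases Nat.mod_two_eq_zero_or_one j with hj2 | hj2
    · simp only [pvMaskSel, hj2] at h
      simp only [if_neg (by omega : ¬((0:Nat) = 1)), List.nil_append] at h
      obtain ⟨s', hsub, hp1, hp2⟩ := ih (j / 2) l1 l2 h
      refine ⟨2 * s', ?_, ?_, ?_⟩
      · have hrec := pvBitRec (2 * s') j
        have ha : 2 * s' / 2 = s' := by omega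
        have hz : (2 * s') % 2 = 0 := by omega
        rw [ha, hsub, hz] at hrec
        omega
      · have hm : (2 * s') % 2 = 0 := by omega
        have ha : 2 * s' / 2 = s' := by omega
        simp only [pvMaskSel, hm, ha]
        simpa using hp1
      · have hxrec := pvXorRec j (2 * s')
        have hm : (j ^^^ 2 * s') % 2 = 0 := by omega
        have ha : (j ^^^ 2 * s') / 2 = j / 2 ^^^ s' := by
          rw [Nat.xor_div_two]
          congr 1
          omega
        simp only [pvMaskSel, hm, ha]
        simpa using hp2
    · simp only [pvMaskSel, hj2, if_pos rfl, List.singleton_append] at h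
      have hq : q ∈ l1 ++ l2 := h.mem_iff.mp (List.mem_cons_self ..)
      rcases List.mem_append.mp hq with hql | hql
      · obtain ⟨s', hsub, hp1, hp2⟩ := ih (j / 2) (l1.erase q) l2 (pvPermEraseL h hql)
        refine ⟨2 * s' + 1, ?_, ?_, ?_⟩
        · have hrec := pvBitRec (2 * s' + 1) j
          have ha : (2 * s' + 1) / 2 = s' := by omega
          have hz : (2 * s' + 1) % 2 = 1 := by omega
          rw [ha, hsub, hz, hj2] at hrec
          omega
        · have hm : (2 * s' + 1) % 2 = 1 := by omega
          have ha : (2 * s' + 1) / 2 = s' := by omega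
          simp only [pvMaskSel, hm, ha, if_pos rfl, List.singleton_append]
          exact (hp1.cons q).trans (List.perm_cons_erase hql).symm
        · have hxrec := pvXorRec j (2 * s' + 1)
          have hm : (j ^^^ (2 * s' + 1)) % 2 = 0 := by omega
          have ha : (j ^^^ (2 * s' + 1)) / 2 = j / 2 ^^^ s' := by
            rw [Nat.xor_div_two]
            congr 1
            omega
          simp only [pvMaskSel, hm, ha]
          simpa using hp2
      · obtain ⟨s', hsub, hp1, hp2⟩ := ih (j / 2) l1 (l2.erase q) (pvPermEraseR h hql)
        refine ⟨2 * s', ?_, ?_, ?_⟩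
        · have hrec := pvBitRec (2 * s') j
          have ha : 2 * s' / 2 = s' := by omega
          have hz : (2 * s') % 2 = 0 := by omega
          rw [ha, hsub, hz] at hrec
          omega
        · have hm : (2 * s') % 2 = 0 := by omega
          have ha : 2 * s' / 2 = s' := by omega
          simp only [pvMaskSel, hm, ha]
          simpa using hp1
        · have hxrec := pvXorRec j (2 * s')
          have hm : (j ^^^ 2 * s') % 2 = 1 := by omega
          have ha : (j ^^^ 2 * s') / 2 = j / 2 ^^^ s' := by
            rw [Nat.xor_div_two]
            congr 1
            omega
          simp only [pvMaskSel, hm, ha, if_pos rfl, List.singleton_append]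
          exact (hp2.cons q).trans (List.perm_cons_erase hql).symm

theorem pvSplit_perm_l : ∀ (cs : List Int) (l l' : List Int), l.Perm l' →
    (pvSplit cs l ↔ pvSplit cs l') := by
  intro cs
  cases cs with
  | nil =>
    intro l l' h
    constructor
    · intro h2
      have hl : l = [] := by simpa [pvSplit] using h2
      subst hl
      have : l' = [] := h.symm.eq_nil
      simp [pvSplit, this]
    · intro h2
      have hl : l' = [] := by simpa [pvSplit] using h2
      subst hl
      have : l = [] := h.eq_nil
      simp [pvSplit, this]
  | cons c cs =>
    intro l l' h
    constructor
    · rintro ⟨l1, l2, hp, hs, hrest⟩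
      exact ⟨l1, l2, h.symm.trans hp, hs, hrest⟩
    · rintro ⟨l1, l2, hp, hs, hrest⟩
      exact ⟨l1, l2, h.trans hp, hs, hrest⟩

theorem pvMaskSel_eq_nil_iff (qs : List Int) :
    ∀ j : Nat, j < 2 ^ qs.length → (pvMaskSel qs j = [] ↔ j = 0) := by
  induction qs with
  | nil =>
    intro j hj
    simp at hj
    constructor
    · intro _; omega
    · intro _; rfl
  | cons q qs ih =>
    intro j hj
    have hj2 : j / 2 < 2 ^ qs.length := by
      simp only [List.length_cons, pow_succ] at hj
      omega
    rcases Nat.mod_two_eq_zero_or_one j with hm | hm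
    · simp only [pvMaskSel, hm, if_neg (by omega : ¬((0:Nat) = 1)), List.nil_append]
      rw [ih (j / 2) hj2]
      omega
    · simp only [pvMaskSel, hm, if_pos rfl, List.singleton_append]
      constructor
      · intro h; exact absurd h (by simp)
      · intro h; omega

theorem pvReachR_iff_split (qs : List Int) :
    ∀ (cs : List Int) (j : Nat), j < 2 ^ qs.length → (∀ c ∈ cs, (0:Int) ≤ c) →
    (pvReachR qs cs j ↔ pvSplit cs (pvMaskSel qs j)) := by
  intro cs
  induction cs with
  | nil =>
    intro j hj _
    show j = 0 ↔ pvMaskSel qs j = []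
    rw [pvMaskSel_eq_nil_iff qs j hj]
  | cons c cs ih =>
    intro j hj hc
    have hc' : ∀ x ∈ cs, (0:Int) ≤ x := fun x hx => hc x (List.mem_cons_of_mem c hx)
    have hc0 : (0:Int) ≤ c := hc c (List.mem_cons_self ..)
    constructor
    · rintro (h | ⟨t, h1, h2, h3, h4⟩)
      · exact ⟨[], pvMaskSel qs j, by simp, by simpa using hc0, (ih j hj hc').mp h⟩
      · have hx : j - t = j ^^^ t := pvSubXor j t h2
        have hb : j ^^^ t < 2 ^ qs.length := by
          have : t ≤ j := by
            conv_lhs => rw [← h2]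
            exact Nat.and_le_right
          omega
        refine ⟨pvMaskSel qs t, pvMaskSel qs (j ^^^ t), pvMaskSplit qs j t h2, ?_,
          (ih (j ^^^ t) hb hc').mp h4⟩
        rw [← pvBitSum_eq_sum]
        exact h3
    · rintro ⟨l1, l2, hp, hsum, hsp⟩
      obtain ⟨t, hsub, hp1, hp2⟩ := pvMaskChoose qs j l1 l2 hp
      have hb : j ^^^ t < 2 ^ qs.length := by
        have hle : t ≤ j := by
          conv_lhs => rw [← hsub]
          exact Nat.and_le_right
        have hx : j - t = j ^^^ t := pvSubXor j t hsub
        omega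
      have hr2 : pvReachR qs cs (j ^^^ t) :=
        (ih (j ^^^ t) hb hc').mpr ((pvSplit_perm_l cs _ _ hp2.symm).mp hsp)
      by_cases ht0 : t = 0
      · subst ht0
        rw [Nat.xor_zero] at hr2
        exact Or.inl hr2
      · refine Or.inr ⟨t, ht0, hsub, ?_, hr2⟩
        rw [pvBitSum_eq_sum, hp1.sum_eq]
        exact hsum

-- ===== pvSplit ↔ pvFits =====

theorem pvSplit_swap (c1 c2 : Int) (cs : List Int) (l : List Int) :
    pvSplit (c1 :: c2 :: cs) l → pvSplit (c2 :: c1 :: cs) l := by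
  rintro ⟨l1, l2, hp, hs, l3, l4, hp2, hs2, hrest⟩
  refine ⟨l3, l1 ++ l4, ?_, hs2, l1, l4, List.Perm.refl _, hs, hrest⟩
  have h5 : (l1 ++ l2).Perm (l1 ++ (l3 ++ l4)) := hp2.append_left l1
  have h6 : ((l1 ++ l3) ++ l4).Perm ((l3 ++ l1) ++ l4) :=
    List.perm_append_comm.append_right l4
  refine hp.trans (h5.trans ?_)
  simpa [List.append_assoc] using h6

theorem pvSplit_perm_cs : ∀ (cs cs' : List Int), cs.Perm cs' → ∀ (l : List Int),
    pvSplit cs l → pvSplit cs' l := by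
  intro cs cs' h
  induction h with
  | nil => intro l h; exact h
  | cons x h ih =>
    rintro l ⟨l1, l2, hp, hs, hrest⟩
    exact ⟨l1, l2, hp, hs, ih l2 hrest⟩
  | swap x y l' => intro l; exact pvSplit_swap y x l' l
  | trans h1 h2 ih1 ih2 => intro l hl; exact ih2 l (ih1 l hl)

theorem pvFits_perm : ∀ (l : List Int) (C C' : List Int), C.Perm C' →
    (pvFits l C → pvFits l C') := by
  intro l
  induction l with
  | nil => intro C C' _ _; trivial
  | cons q l ih =>
    rintro C C' h ⟨v, hv, hq, hrest⟩
    exact ⟨v, h.mem_iff.mp hv, hq, ih _ _ (List.Perm.cons _ (h.erase v)) hrest⟩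

theorem pvSplit_nil : ∀ (C : List Int), (∀ c ∈ C, (0:Int) ≤ c) → pvSplit C [] := by
  intro C
  induction C with
  | nil => intro _; rfl
  | cons c cs ih =>
    intro hc
    exact ⟨[], [], by simp, by simpa using hc c (List.mem_cons_self ..),
      ih (fun x hx => hc x (List.mem_cons_of_mem c hx))⟩

theorem pvSplit_of_fits : ∀ (l C : List Int), (∀ c ∈ C, (0:Int) ≤ c) →
    pvFits l C → pvSplit C l := by
  intro l
  induction l with
  | nil => intro C hc _; exact pvSplit_nil C hc
  | cons q l ih =>
    rintro C hc ⟨v, hv, hq, hfits⟩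
    have hc0 : (0:Int) ≤ v := hc v hv
    have hc' : ∀ x ∈ (v - q) :: C.erase v, (0:Int) ≤ x := by
      intro x hx
      rcases List.mem_cons.mp hx with h | h
      · subst h; omega
      · exact hc x (List.mem_of_mem_erase h)
    obtain ⟨l1, l2, hp, hsum, hsp⟩ := ih _ hc' hfits
    have hgoal : pvSplit (v :: C.erase v) (q :: l) :=
      ⟨q :: l1, l2, by simpa using hp.cons q, by simp; omega, hsp⟩
    exact pvSplit_perm_cs _ _ (List.perm_cons_erase hv).symm _ hgoal

theorem pvSplitAssign : ∀ (cs : List Int) (q : Int) (L : List Int),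
    (∀ c ∈ cs, (0:Int) ≤ c) → (∀ x ∈ L, q ≤ x) → pvSplit cs (q :: L) →
    ∃ v cs', v ∈ cs ∧ q ≤ v ∧ cs.Perm (v :: cs') ∧ pvSplit ((v - q) :: cs') L := by
  intro cs
  induction cs with
  | nil =>
    rintro q L _ _ h
    exact absurd (show (q :: L) = ([]:List Int) from h) (by simp)
  | cons c cs ih =>
    rintro q L hc hL ⟨l1, l2, hp, hsum, hsp⟩
    have hc0 : (0:Int) ≤ c := hc c (List.mem_cons_self ..)
    have hc' : ∀ x ∈ cs, (0:Int) ≤ x := fun x hx => hc x (List.mem_cons_of_mem c hx)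
    have hmemq : ∀ x ∈ l1 ++ l2, q ≤ x := by
      intro x hx
      rcases List.mem_cons.mp (hp.symm.mem_iff.mp hx) with h | h
      · omega
      · exact hL x h
    have hq : q ∈ l1 ++ l2 := hp.mem_iff.mp (List.mem_cons_self ..)
    rcases List.mem_append.mp hq with hql | hql
    · -- q served by the first count c
      have hL2 : L.Perm (l1.erase q ++ l2) := pvPermEraseL hp hql
      have hsum1 : l1.sum = q + (l1.erase q).sum := by
        rw [(List.perm_cons_erase hql).sum_eq]
        simp
      have hqc : q ≤ c := by
        rcases le_or_gt q 0 with h | h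
        · omega
        · have hpos : (0:Int) ≤ (l1.erase q).sum := by
            apply List.sum_nonneg
            intro x hx
            have : q ≤ x := hmemq x (List.mem_append_left l2 (List.mem_of_mem_erase hx))
            omega
          omega
      refine ⟨c, cs, List.mem_cons_self .., hqc, List.Perm.refl _,
        ⟨l1.erase q, l2, hL2, by omega, hsp⟩⟩
    · -- q served inside the remaining counts
      have hL2 : L.Perm (l1 ++ l2.erase q) := pvPermEraseR hp hql
      have hsp' : pvSplit cs (q :: l2.erase q) :=
        (pvSplit_perm_l cs _ _ (List.perm_cons_erase hql)).mp hsp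
      have hLe : ∀ x ∈ l2.erase q, q ≤ x := fun x hx =>
        hmemq x (List.mem_append_right l1 (List.mem_of_mem_erase hx))
      obtain ⟨v, cs'', hv, hqv, hperm, hsplit⟩ := ih q (l2.erase q) hc' hLe hsp'
      refine ⟨v, c :: cs'', List.mem_cons_of_mem c hv, hqv, ?_, ?_⟩
      · exact (hperm.cons c).trans (List.Perm.swap v c cs'')
      · exact pvSplit_swap c (v - q) cs'' L ⟨l1, l2.erase q, hL2, hsum, hsplit⟩

theorem pvFits_of_split : ∀ (l C : List Int), l.Pairwise (· ≤ ·) →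
    (∀ c ∈ C, (0:Int) ≤ c) → pvSplit C l → pvFits l C := by
  intro l
  induction l with
  | nil => intro C _ _ _; trivial
  | cons q l ih =>
    intro C hpair hc hsplit
    have hq_all : ∀ x ∈ l, q ≤ x := fun x hx => (List.pairwise_cons.mp hpair).1 x hx
    obtain ⟨v, cs', hv, hqv, hperm, hsplit'⟩ := pvSplitAssign C q l hc hq_all hsplit
    refine ⟨v, hv, hqv, ?_⟩
    have hc' : ∀ x ∈ (v - q) :: cs', (0:Int) ≤ x := by
      intro x hx
      rcases List.mem_cons.mp hx with h | h
      · subst h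
        have := hc v hv
        omega
      · exact hc x (hperm.symm.mem_iff.mp (List.mem_cons_of_mem v h))
    have hfits := ih ((v - q) :: cs') (List.pairwise_cons.mp hpair).2 hc' hsplit'
    refine pvFits_perm l _ _ ?_ hfits
    refine List.Perm.cons _ ?_
    have h1 : (C.erase v).Perm ((v :: cs').erase v) := hperm.erase v
    simpa [List.erase_cons_head] using h1.symm

-- ===== B's dfs ↔ pvFits =====

theorem pvExpandL_count_notmem : ∀ (ps : List (Int × Int)) (x : Int),
    x ∉ ps.map Prod.fst →
    (ps.flatMap (fun p => List.replicate p.2.toNat p.1)).count x = 0 := by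
  intro ps
  induction ps with
  | nil => intro x _; rfl
  | cons p ps ih =>
    intro x hx
    simp only [List.map_cons, List.mem_cons] at hx
    push_neg at hx
    have hne : ¬((p.1 == x) = true) := by
      intro h
      exact hx.1 (beq_iff_eq.mp h).symm
    rw [List.flatMap_cons, List.count_append, List.count_replicate, if_neg hne, ih x hx.2]

theorem pvCountExpand : ∀ (ps : List (Int × Int)), (ps.map Prod.fst).Nodup →
    ∀ x : Int, (ps.flatMap (fun p => List.replicate p.2.toNat p.1)).count x
      = ((PySem.Dict.mk ps).getD x 0).toNat := by
  intro ps
  induction ps with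
  | nil => intro _ x; rfl
  | cons p ps ih =>
    intro hnd x
    obtain ⟨k, v⟩ := p
    simp only [List.map_cons, List.nodup_cons] at hnd
    rw [List.flatMap_cons, List.count_append, List.count_replicate]
    have hgd : (PySem.Dict.mk ((k, v) :: ps)).getD x 0
        = if (k == x) = true then v else (PySem.Dict.mk ps).getD x 0 := by
      show ((PySem.Dict.mk ((k, v) :: ps)).get? x).getD 0 = _
      rw [PySem.Dict.get?_mk_cons]
      split_ifs <;> rfl
    rw [hgd]
    by_cases hkx : (k == x) = true
    · rw [if_pos hkx, if_pos hkx]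
      have hkx' : k = x := beq_iff_eq.mp hkx
      subst hkx'
      rw [pvExpandL_count_notmem ps k hnd.1]
      omega
    · rw [if_neg hkx, if_neg hkx, ih hnd.2 x]
      omega

theorem pvExpand_count (d : PySem.Dict Int Int) (hnd : d.keys.Nodup) (x : Int) :
    (pvExpand d).count x = (d.getD x 0).toNat :=
  pvCountExpand d.items hnd x

theorem pvMem_expand_keys (d : PySem.Dict Int Int) (x : Int) (h : x ∈ pvExpand d) :
    x ∈ d.keys := by
  unfold pvExpand at h
  rw [List.mem_flatMap] at h
  obtain ⟨p, hp, hx⟩ := h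
  rw [List.mem_replicate] at hx
  show x ∈ d.items.map Prod.fst
  exact List.mem_map.mpr ⟨p, hp, hx.2.symm⟩

theorem pvStepD_getD (d : PySem.Dict Int Int) (v q x : Int) :
    ((d.modify v 0 (· - 1)).modify (v - q) 0 (· + 1)).getD x 0
      = if x = v - q then (if v - q = v then d.getD v 0 - 1 else d.getD (v - q) 0) + 1
        else if x = v then d.getD v 0 - 1 else d.getD x 0 := by
  rw [PySem.Dict.getD_modify]
  by_cases h1 : x = v - q
  · rw [if_pos h1, if_pos h1, PySem.Dict.getD_modify]
  · rw [if_neg h1, if_neg h1, PySem.Dict.getD_modify]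

theorem pvStepD_nodup (d : PySem.Dict Int Int) (v q : Int) (hnd : d.keys.Nodup) :
    ((d.modify v 0 (· - 1)).modify (v - q) 0 (· + 1)).keys.Nodup := by
  rw [PySem.Dict.keys_modify]
  apply PySem.Dict.nodup_keys_insert
  rw [PySem.Dict.keys_modify]
  exact PySem.Dict.nodup_keys_insert _ _ _ hnd

theorem pvStepD_inv (d : PySem.Dict Int Int) (v q : Int) (hinv : pvCapsInv d)
    (hpos : 0 < d.getD v 0) :
    pvCapsInv ((d.modify v 0 (· - 1)).modify (v - q) 0 (· + 1)) := by
  refine ⟨pvStepD_nodup d v q hinv.1, ?_⟩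
  intro x
  rw [pvStepD_getD]
  have h1 := hinv.2 x
  have h2 := hinv.2 (v - q)
  split_ifs <;> omega

theorem pvStepD_perm (d : PySem.Dict Int Int) (v q : Int) (hinv : pvCapsInv d)
    (hpos : 0 < d.getD v 0) :
    (pvExpand ((d.modify v 0 (· - 1)).modify (v - q) 0 (· + 1))).Perm
      ((v - q) :: (pvExpand d).erase v) := by
  rw [List.perm_iff_count]
  intro x
  rw [pvExpand_count _ (pvStepD_nodup d v q hinv.1) x, pvStepD_getD,
    List.count_cons, List.count_erase, pvExpand_count d hinv.1 x]
  have hax := hinv.2 x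
  have hav := hinv.2 v
  have haq := hinv.2 (v - q)
  have hcv : (pvExpand d).count v = (d.getD v 0).toNat := pvExpand_count d hinv.1 v
  by_cases h1 : x = v - q
  · rw [if_pos h1]
    subst h1
    by_cases h2 : v - q = v
    · rw [if_pos h2]
      rw [h2]
      simp only [beq_self_eq_true, if_true]
      omega
    · rw [if_neg h2, if_pos (beq_iff_eq.mpr rfl),
        if_neg (fun hc => h2 (beq_iff_eq.mp hc).symm)]
      omega
  · rw [if_neg h1, if_neg (fun hc => h1 (beq_iff_eq.mp hc).symm)]
    by_cases h2 : x = v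
    · rw [if_pos h2, if_pos (beq_iff_eq.mpr h2.symm)]
      subst h2
      omega
    · rw [if_neg h2, if_neg (fun hc => h2 (beq_iff_eq.mp hc).symm)]
      omega

theorem pvDfsB_iff_fits : ∀ (l : List Int) (d : PySem.Dict Int Int), pvCapsInv d →
    (pvDfsB l d = true ↔ pvFits l (pvExpand d)) := by
  intro l
  induction l with
  | nil => intro d _; simp [pvDfsB, pvFits]
  | cons q rest ih =>
    intro d hinv
    simp only [pvDfsB, List.any_eq_true]
    constructor
    · rintro ⟨v, hvk, hP⟩
      rw [Bool.and_eq_true, Bool.and_eq_true] at hP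
      obtain ⟨⟨h0, hq⟩, hrec⟩ := hP
      rw [decide_eq_true_eq] at h0 hq
      have hinv2 := pvStepD_inv d v q hinv h0
      have hfits2 := (ih _ hinv2).mp hrec
      have hperm := pvStepD_perm d v q hinv h0
      refine ⟨v, ?_, hq, pvFits_perm _ _ _ hperm hfits2⟩
      have hc := pvExpand_count d hinv.1 v
      have : 0 < (pvExpand d).count v := by omega
      exact List.count_pos_iff.mp this
    · rintro ⟨v, hv, hq, hfit⟩
      have hvk := pvMem_expand_keys d v hv
      have h0 : 0 < d.getD v 0 := by
        have hc := pvExpand_count d hinv.1 v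
        have hm : 0 < (pvExpand d).count v := List.count_pos_iff.mpr hv
        omega
      refine ⟨v, hvk, ?_⟩
      rw [Bool.and_eq_true, Bool.and_eq_true]
      refine ⟨⟨decide_eq_true h0, decide_eq_true hq⟩, ?_⟩
      rw [ih _ (pvStepD_inv d v q hinv h0)]
      exact pvFits_perm _ _ _ (pvStepD_perm d v q hinv h0).symm hfit

theorem pvExpand_counter (L : List Int) : (pvExpand (PySem.Dict.counter L)).Perm L := by
  rw [List.perm_iff_count]
  intro x
  rw [pvExpand_count _ (PySem.Dict.nodup_keys_counter L) x, PySem.Dict.getD_counter]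
  exact Int.toNat_natCast _

theorem pvCapsInv_counter (L : List Int) : pvCapsInv (PySem.Dict.counter L) := by
  refine ⟨PySem.Dict.nodup_keys_counter L, ?_⟩
  intro x
  rw [PySem.Dict.getD_counter]
  exact Int.natCast_nonneg _

-- counter values are the occurrence counts, each nonnegative
theorem pvValues_counter_nonneg (L : List Int) :
    ∀ c ∈ (PySem.Dict.counter L).values, (0:Int) ≤ c := by
  intro c hc
  simp only [PySem.Dict.values, PySem.Dict.items_counter, List.map_map, List.mem_map] at hc
  obtain ⟨k, _, hk⟩ := hc
  simpa [← hk] using Int.natCast_nonneg _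

-- ===== VERDICT (by name: the statement is the Claim_ definition above) =====
theorem canDistribute_dp_spec : Claim_equal_canDistribute_dp := by
  unfold Claim_equal_canDistribute_dp
  intro nums quantity _
  unfold Spec_canDistribute_dp
  have hfull : 2 ^ quantity.length - 1 < 2 ^ quantity.length := by
    have := Nat.one_le_two_pow (n := quantity.length)
    omega
  set qs := quantity with hqs
  set vs : List Int := (PySem.Dict.counter nums).values with hvs
  have hvpos : ∀ c ∈ vs, (0:Int) ≤ c := pvValues_counter_nonneg nums
  have hvposR : ∀ c ∈ vs.reverse, (0:Int) ≤ c := by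
    intro c hc; exact hvpos c (List.mem_reverse.mp hc)
  -- A side
  rw [pvA_eq_chain]
  have hA := pvChain_iff qs vs (2 ^ qs.length - 1) hfull
  -- B side
  have hBdfs := pvDfsB_iff_fits (PySem.List.sorted qs (fun x => x) false)
    (PySem.Dict.counter vs) (pvCapsInv_counter vs)
  -- sorted facts
  have hsp : (PySem.List.sorted qs (fun x => x) false).Perm qs :=
    PySem.List.sorted_perm qs (fun x => x) false
  have hpair : (PySem.List.sorted qs (fun x => x) false).Pairwise (· ≤ ·) := by
    have := PySem.List.sorted_pairwise qs (fun x => x)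
    simpa using this
  rw [Bool.eq_iff_iff]
  rw [hA]
  unfold canDistribute_dp_alt
  rw [hBdfs]
  -- chain the characterizations
  rw [pvReachR_iff_split qs vs.reverse _ hfull hvposR]
  rw [pvMaskSel_full]
  constructor
  · intro hsplit
    have h1 : pvSplit vs.reverse (PySem.List.sorted qs (fun x => x) false) :=
      (pvSplit_perm_l vs.reverse _ _ hsp.symm).mp hsplit
    have h2 : pvFits (PySem.List.sorted qs (fun x => x) false) vs.reverse :=
      pvFits_of_split _ _ hpair hvposR h1
    refine pvFits_perm _ _ _ ?_ h2
    exact (List.reverse_perm vs).trans (pvExpand_counter vs).symm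
  · intro hfits
    have h2 : pvFits (PySem.List.sorted qs (fun x => x) false) vs.reverse :=
      pvFits_perm _ _ _ ((pvExpand_counter vs).trans (List.reverse_perm vs).symm) hfits
    have h1 : pvSplit vs.reverse (PySem.List.sorted qs (fun x => x) false) :=
      pvSplit_of_fits _ _ hvposR h2
    exact (pvSplit_perm_l vs.reverse _ _ hsp).mp h1
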